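-- pv_equiv track=rewrite | github.com/daniel347x/workflowy-mcp-fixed | nexus_json_tools.py | _compute_delete_roots
-- ===== SOURCE A (Python) =====
-- from typing import Any, Dict, List, Optional, Tuple, Set
--
-- def _compute_delete_roots(delete_ids: List[str], parent_map: Dict[str, Optional[str]]) -> List[str]:
--     """Given a set of ids to delete and a parent map from S0, compute branch roots.
--
--     This mirrors the logic used in workflowy_move_reconcile: we only need to
--     explicitly delete the highest ancestors; their descendants go with them.
--     """
--     to_delete_set = set(delete_ids)
--     roots: set[str] = set()
--     for d in to_delete_set:
--         cur = parent_map.get(d)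
--         is_root = True
--         while cur is not None:
--             if cur in to_delete_set:
--                 is_root = False
--                 break
--             cur = parent_map.get(cur)
--         if is_root:
--             roots.add(d)
--     return list(roots)
-- ===== SOURCE B (Python) =====
-- def _compute_delete_roots(delete_ids, parent_map):
--     # Memoized variant: caches, per visited node, whether some ancestor-or-self
--     # lies in the delete set, so each node's chain is walked at most once.
--     s = set(delete_ids)
--     cache = {}  # node -> True iff node or one of its ancestors is in s (node itself not in s when cached)
--     out = set()
--     for d in s:
--         p = parent_map.get(d)
--         if p is None:
--             out.add(d)
--             continue
--         path = []
--         cur = p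
--         res = False
--         while cur is not None:
--             if cur in cache:
--                 res = cache[cur]
--                 break
--             if cur in s:
--                 res = True
--                 break
--             path.append(cur)
--             cur = parent_map.get(cur)
--         for y in path:
--             cache[y] = res
--         if not res:
--             out.add(d)
--     return list(out)
-- ===== Notes on version B (the rewrite author's own statement) =====
-- stated objective: alternative
-- what changed: Instead of re-walking the full ancestor chain of every delete id, B memoizes per visited node whether an ancestor-or-self lies in the delete set, so each chain node is traversed at most once across all queries.
-- outside the precondition, e.g. on _compute_delete_roots(['a', 'b'], {'a': 'b', 'b': 'a'}): A returns [], B returns []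
import Mathlib
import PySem

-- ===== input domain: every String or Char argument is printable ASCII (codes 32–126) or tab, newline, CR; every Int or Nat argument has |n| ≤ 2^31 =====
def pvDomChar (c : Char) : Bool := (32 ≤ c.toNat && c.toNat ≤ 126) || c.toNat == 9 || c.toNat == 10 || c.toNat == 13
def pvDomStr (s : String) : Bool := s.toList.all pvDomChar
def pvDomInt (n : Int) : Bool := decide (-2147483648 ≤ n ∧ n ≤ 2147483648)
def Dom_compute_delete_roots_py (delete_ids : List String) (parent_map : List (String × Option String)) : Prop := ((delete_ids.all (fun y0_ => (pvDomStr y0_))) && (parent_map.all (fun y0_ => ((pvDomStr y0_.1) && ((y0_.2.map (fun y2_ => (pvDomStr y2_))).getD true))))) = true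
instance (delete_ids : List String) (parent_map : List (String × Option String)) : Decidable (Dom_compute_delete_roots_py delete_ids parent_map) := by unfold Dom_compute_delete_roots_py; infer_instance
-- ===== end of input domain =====

-- B memoizes, per visited node, whether an ancestor-or-self is in the delete set,
-- so every chain node is walked at most once (objective: alternative algorithm, same measured cost).


-- parent_map.get(x): Python dict.get with default None
def pvGet (parent_map : List (String × Option String)) (x : String) : Option String :=
  (PySem.Dict.ofList parent_map).getD x none

-- ===== PORT A =====
-- the 'while cur is not None' loop; fuel makes it total (under Pre_ it never runs out).
-- returns is_root
def pvALoop (S : PySem.Set String) (parent_map : List (String × Option String)) :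
    Nat → Option String → Bool
  | 0, _ => true
  | _ + 1, none => true
  | f + 1, some c =>
      if PySem.Set.contains S c then false else pvALoop S parent_map f (pvGet parent_map c)

def compute_delete_roots_py (delete_ids : List String) (parent_map : List (String × Option String)) : List String :=
  let to_delete_set : PySem.Set String := PySem.Set.ofList delete_ids
  let roots : PySem.Set String :=
    to_delete_set.foldl
      (fun roots d =>
        if pvALoop to_delete_set parent_map (parent_map.length + 1) (pvGet parent_map d)
        then PySem.Set.add roots d else roots)
      PySem.Set.empty
  roots

-- ===== PORT B =====
-- commit: 'for y in path: cache[y] = res'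
def pvCommit (cache : PySem.Dict String Bool) (path : List String) (r : Bool) : PySem.Dict String Bool :=
  path.foldl (fun ch y => ch.insert y r) cache

-- the memoized chain walk of Source B; returns (res, updated cache)
def pvAncWalk (S : PySem.Set String) (parent_map : List (String × Option String)) :
    Nat → List String → PySem.Dict String Bool → Option String → Bool × PySem.Dict String Bool
  | 0, _, cache, _ => (false, cache)
  | _ + 1, path, cache, none => (false, pvCommit cache path false)
  | f + 1, path, cache, some c =>
      match cache.get? c with
      | some b => (b, pvCommit cache path b)
      | none =>
          if PySem.Set.contains S c then (true, pvCommit cache path true)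
          else pvAncWalk S parent_map f (path ++ [c]) cache (pvGet parent_map c)

-- one iteration of Source B's main 'for d in s' loop
def pvBStep (s : PySem.Set String) (parent_map : List (String × Option String))
    (st : PySem.Set String × PySem.Dict String Bool) (d : String) :
    PySem.Set String × PySem.Dict String Bool :=
  match pvGet parent_map d with
  | none => (PySem.Set.add st.1 d, st.2)
  | some p =>
      let rc := pvAncWalk s parent_map (parent_map.length + 1) [] st.2 (some p)
      if rc.1 then (st.1, rc.2) else (PySem.Set.add st.1 d, rc.2)

def compute_delete_roots_py_alt (delete_ids : List String) (parent_map : List (String × Option String)) : List String :=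
  let s : PySem.Set String := PySem.Set.ofList delete_ids
  (s.foldl (pvBStep s parent_map) (PySem.Set.empty, PySem.Dict.empty)).1

-- ===== PRECONDITION & SPEC =====
-- Pre_: the parent map is acyclic — from every key, following parent pointers
-- (none is absorbing) reaches none within |parent_map| steps.
-- This excludes cyclic parent maps, on which A's while-loop can run forever; it also
-- excludes some cyclic maps on which A happens to return (cycle inside the delete set,
-- or unreachable from it) — there B returns the same value, see the claim's cites.
def Pre_compute_delete_roots_py (delete_ids : List String) (parent_map : List (String × Option String)) : Prop :=
  ∀ x ∈ (PySem.Dict.ofList parent_map).keys,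
    (fun o : Option String => o.bind (pvGet parent_map))^[parent_map.length + 1] (some x) = none

instance (delete_ids : List String) (parent_map : List (String × Option String)) : Decidable (Pre_compute_delete_roots_py delete_ids parent_map) := by unfold Pre_compute_delete_roots_py; infer_instance

def pvWitness_compute_delete_roots_py : List String × (List (String × Option String)) :=
  (["a", "b"], [("a", some "b"), ("b", none)])

def Spec_compute_delete_roots_py (delete_ids : List String) (parent_map : List (String × Option String)) (out : List String) : Prop := out = compute_delete_roots_py_alt delete_ids parent_map
instance (delete_ids : List String) (parent_map : List (String × Option String)) (out : List String) : Decidable (Spec_compute_delete_roots_py delete_ids parent_map out) := by unfold Spec_compute_delete_roots_py; infer_instance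

-- ===== CLAIM (what is proved, stated in full; the proofs are below) =====
def Claim_equal_compute_delete_roots_py : Prop := ∀ (delete_ids : List String) (parent_map : List (String × Option String)), Dom_compute_delete_roots_py delete_ids parent_map → Pre_compute_delete_roots_py delete_ids parent_map → Spec_compute_delete_roots_py delete_ids parent_map (compute_delete_roots_py delete_ids parent_map)

-- ===== LEMMAS AND PROOFS =====

-- chain iteration, recursively (equals the iterate in Pre_)
def pvIter (parent_map : List (String × Option String)) : Nat → Option String → Option String
  | 0, cur => cur
  | _ + 1, none => none
  | f + 1, some c => pvIter parent_map f (pvGet parent_map c)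

-- reference ancestor predicate: 'x or some ancestor of x is in S', with fuel
def pvAnc (S : PySem.Set String) (parent_map : List (String × Option String)) : Nat → String → Bool
  | 0, _ => false
  | f + 1, x =>
      PySem.Set.contains S x ||
        (match pvGet parent_map x with
         | none => false
         | some p => pvAnc S parent_map f p)

def pvOptHit (S : PySem.Set String) (parent_map : List (String × Option String)) : Nat → Option String → Bool
  | 0, _ => false
  | _ + 1, none => false
  | f + 1, some c => PySem.Set.contains S c || pvOptHit S parent_map f (pvGet parent_map c)

theorem pvALoop_eq_not_optHit (S : PySem.Set String) (pm : List (String × Option String)) :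
    ∀ (f : Nat) (cur : Option String), pvALoop S pm f cur = !pvOptHit S pm f cur := by
  intro f
  induction f with
  | zero => intro cur; rfl
  | succ f ih =>
      intro cur
      cases cur with
      | none => rfl
      | some c =>
          cases h : PySem.Set.contains S c with
          | true =>
              have hm : c ∈ S := (PySem.Set.contains_iff _ _).mp h
              simp [pvALoop, pvOptHit, hm]
          | false =>
              have hm : c ∉ S := by rw [← PySem.Set.contains_iff _ _, h]; simp
              simp [pvALoop, pvOptHit, hm, ih]

theorem pvOptHit_some (S : PySem.Set String) (pm : List (String × Option String)) :
    ∀ (f : Nat) (c : String), pvOptHit S pm f (some c) = pvAnc S pm f c := by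
  intro f
  induction f with
  | zero => intro c; rfl
  | succ f ih =>
      intro c
      cases h : pvGet pm c with
      | none =>
          cases f with
          | zero => simp [pvOptHit, pvAnc, h]
          | succ g => simp [pvOptHit, pvAnc, h]
      | some p => simp [pvOptHit, pvAnc, h, ih]

theorem pvIter_none (pm : List (String × Option String)) : ∀ f : Nat, pvIter pm f none = none := by
  intro f; cases f <;> rfl

theorem pvIter_eq_iterate (pm : List (String × Option String)) :
    ∀ (f : Nat) (cur : Option String),
      (fun o : Option String => o.bind (pvGet pm))^[f] cur = pvIter pm f cur := by
  intro f
  induction f with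
  | zero => intro cur; rfl
  | succ f ih =>
      intro cur
      rw [Function.iterate_succ_apply, ih]
      cases cur with
      | none =>
          show pvIter pm f none = pvIter pm (f + 1) none
          rw [pvIter_none, pvIter_none]
      | some c =>
          show pvIter pm f (pvGet pm c) = pvIter pm (f + 1) (some c)
          rfl

-- stability of pvAnc once the chain terminates
theorem pvAnc_stable (S : PySem.Set String) (pm : List (String × Option String)) :
    ∀ (k : Nat) (x : String), pvIter pm k (some x) = none →
      ∀ f : Nat, k ≤ f → pvAnc S pm f x = pvAnc S pm k x := by
  intro k
  induction k with
  | zero => intro x h; simp [pvIter] at h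
  | succ k ih =>
      intro x h f hf
      obtain ⟨g, rfl⟩ : ∃ g, f = g + 1 := ⟨f - 1, by omega⟩
      simp only [pvIter] at h
      cases hg : pvGet pm x with
      | none => simp [pvAnc, hg]
      | some p =>
          rw [hg] at h
          simp only [pvAnc, hg]
          rw [ih p h g (by omega)]

theorem pvAnc_stable₂ (S : PySem.Set String) (pm : List (String × Option String))
    (k f₁ f₂ : Nat) (x : String) (h : pvIter pm k (some x) = none)
    (h1 : k ≤ f₁) (h2 : k ≤ f₂) : pvAnc S pm f₁ x = pvAnc S pm f₂ x := by
  rw [pvAnc_stable S pm k x h f₁ h1, pvAnc_stable S pm k x h f₂ h2]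

-- under Pre_, every chain terminates within the ports' fuel
theorem pvPre_allNone (ds : List String) (pm : List (String × Option String))
    (hpre : Pre_compute_delete_roots_py ds pm) :
    ∀ cur : Option String, pvIter pm (pm.length + 1) cur = none := by
  intro cur
  cases cur with
  | none => exact pvIter_none pm _
  | some x =>
      by_cases hx : x ∈ (PySem.Dict.ofList pm).keys
      · rw [← pvIter_eq_iterate]; exact hpre x hx
      · have hget : pvGet pm x = none := by
          unfold pvGet
          rw [PySem.Dict.getD_of_not_contains]
          rw [← Bool.not_eq_true]
          intro hc
          exact hx ((PySem.Dict.contains_iff_mem_keys _ _).mp hc)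
        simp only [pvIter, hget]
        exact pvIter_none pm _

-- cache correctness
def pvCacheOK (S : PySem.Set String) (pm : List (String × Option String))
    (cache : PySem.Dict String Bool) : Prop :=
  ∀ y b, cache.get? y = some b → b = pvAnc S pm (pm.length + 1) y

theorem pvCommit_ok (S : PySem.Set String) (pm : List (String × Option String)) (r : Bool) :
    ∀ (path : List String) (cache : PySem.Dict String Bool),
      pvCacheOK S pm cache → (∀ y ∈ path, pvAnc S pm (pm.length + 1) y = r) →
      pvCacheOK S pm (pvCommit cache path r) := by
  intro path
  induction path with
  | nil => intro cache hc _; exact hc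
  | cons y ys ih =>
      intro cache hc hp
      simp only [pvCommit, List.foldl_cons]
      have hstep : pvCacheOK S pm (cache.insert y r) := by
        intro z b hz
        rw [PySem.Dict.get?_insert] at hz
        by_cases hzy : z = y
        · rw [if_pos hzy] at hz
          injection hz with hb
          rw [← hb, hzy]
          exact (hp y (by simp)).symm
        · rw [if_neg hzy] at hz
          exact hc z b hz
      exact ih (cache.insert y r) hstep (fun z hz => hp z (by simp [hz]))

-- the value written with the path: each path element's answer equals r
def pvHitOpt (S : PySem.Set String) (pm : List (String × Option String)) (cur : Option String) : Bool :=
  match cur with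
  | none => false
  | some c => pvAnc S pm (pm.length + 1) c

theorem pvAncWalk_correct (S : PySem.Set String) (pm : List (String × Option String)) :
    ∀ (f : Nat) (path : List String) (cache : PySem.Dict String Bool) (cur : Option String),
      pvIter pm f cur = none → f ≤ pm.length + 1 → pvCacheOK S pm cache →
      (∀ y ∈ path, pvAnc S pm (pm.length + 1) y = pvHitOpt S pm cur) →
      (pvAncWalk S pm f path cache cur).1 = pvHitOpt S pm cur ∧
        pvCacheOK S pm (pvAncWalk S pm f path cache cur).2 := by
  intro f
  induction f with
  | zero =>
      intro path cache cur hter _ hc _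
      simp only [pvIter] at hter
      subst hter
      exact ⟨rfl, hc⟩
  | succ f ih =>
      intro path cache cur hter hle hc hpath
      cases cur with
      | none =>
          refine ⟨rfl, ?_⟩
          exact pvCommit_ok S pm false path cache hc (fun y hy => hpath y hy)
      | some c =>
          simp only [pvIter] at hter
          cases hcc : cache.get? c with
          | some b =>
              have hb := hc c b hcc
              simp only [pvAncWalk, hcc]
              constructor
              · simpa [pvHitOpt] using hb
              · exact pvCommit_ok S pm b path cache hc
                  (fun y hy => by rw [hpath y hy]; simpa [pvHitOpt] using hb.symm)
          | none =>
              cases hS : PySem.Set.contains S c with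
              | true =>
                have hm : c ∈ S := (PySem.Set.contains_iff _ _).mp hS
                have hanc : pvAnc S pm (pm.length + 1) c = true := by
                  simp [pvAnc, hm]
                simp only [pvAncWalk, hcc, hS, if_true]
                constructor
                · simpa [pvHitOpt] using hanc.symm
                · exact pvCommit_ok S pm true path cache hc
                    (fun y hy => by rw [hpath y hy]; simpa [pvHitOpt] using hanc)
              | false =>
                have hm : c ∉ S := by rw [← PySem.Set.contains_iff _ _, hS]; simp
                simp only [pvAncWalk, hcc, hS, Bool.false_eq_true, if_false]
                -- key fact: pvAnc (N) c = pvHitOpt (pvGet pm c)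
                have hkey : pvAnc S pm (pm.length + 1) c = pvHitOpt S pm (pvGet pm c) := by
                  simp only [pvAnc, hS, Bool.false_or]
                  cases hg : pvGet pm c with
                  | none => rfl
                  | some p =>
                      simp only [pvHitOpt]
                      rw [hg] at hter
                      exact pvAnc_stable₂ S pm f pm.length (pm.length + 1) p hter
                        (by omega) (by omega)
                have hpath' : ∀ y ∈ path ++ [c],
                    pvAnc S pm (pm.length + 1) y = pvHitOpt S pm (pvGet pm c) := by
                  intro y hy
                  rcases List.mem_append.mp hy with hy | hy
                  · rw [hpath y hy]; simp only [pvHitOpt]; exact hkey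
                  · simp at hy; subst hy; exact hkey
                have := ih (path ++ [c]) cache (pvGet pm c) hter (by omega) hc hpath'
                refine ⟨?_, this.2⟩
                rw [this.1, ← hkey]
                simp [pvHitOpt]

-- the Set.add fold over a nodup list of fresh elements is append of a filter
theorem pvFoldAdd_filter (p : String → Bool) :
    ∀ (l : List String) (r : PySem.Set String), l.Nodup → (∀ y ∈ l, y ∉ r) →
      l.foldl (fun r d => if p d then PySem.Set.add r d else r) r = r ++ l.filter p := by
  intro l
  induction l with
  | nil => intro r _ _; simp
  | cons d l ih =>
      intro r hnd hfresh
      simp only [List.foldl_cons, List.filter_cons]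
      by_cases hp : p d
      · rw [if_pos hp, if_pos hp]
        rw [PySem.Set.add_of_not_mem (hfresh d (by simp))]
        rw [ih (r ++ [d]) hnd.of_cons]
        · simp
        · intro y hy
          simp only [List.mem_append, List.mem_singleton]
          rintro (h | rfl)
          · exact hfresh y (by simp [hy]) h
          · exact (List.nodup_cons.mp hnd).1 hy
      · rw [if_neg hp, if_neg (by simp [hp])]
        exact ih r hnd.of_cons (fun y hy => hfresh y (by simp [hy]))

-- A computes the filter
theorem pvA_eq_filter (ds : List String) (pm : List (String × Option String)) :
    compute_delete_roots_py ds pm =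
      (PySem.Set.ofList ds).filter
        (fun d => pvALoop (PySem.Set.ofList ds) pm (pm.length + 1) (pvGet pm d)) := by
  unfold compute_delete_roots_py
  have := pvFoldAdd_filter
    (fun d => pvALoop (PySem.Set.ofList ds) pm (pm.length + 1) (pvGet pm d))
    (PySem.Set.ofList ds) PySem.Set.empty (PySem.Set.nodup_ofList ds)
    (by intro y _ hy; simp [PySem.Set.empty] at hy)
  simpa [PySem.Set.empty] using this

-- B's fold invariant
theorem pvB_fold (ds : List String) (pm : List (String × Option String))
    (hpre : Pre_compute_delete_roots_py ds pm) :
    ∀ (l : List String) (out : PySem.Set String) (cache : PySem.Dict String Bool),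
      l.Nodup → (∀ y ∈ l, y ∉ out) → pvCacheOK (PySem.Set.ofList ds) pm cache →
      (l.foldl (pvBStep (PySem.Set.ofList ds) pm) (out, cache)).1 =
      out ++ l.filter (fun d => pvALoop (PySem.Set.ofList ds) pm (pm.length + 1) (pvGet pm d)) := by
  intro l
  induction l with
  | nil => intro out cache _ _ _; simp
  | cons d l ih =>
      intro out cache hnd hfresh hcache
      simp only [List.foldl_cons, List.filter_cons]
      cases hg : pvGet pm d with
      | none =>
          rw [show pvALoop (PySem.Set.ofList ds) pm (pm.length + 1) none = true from rfl]
          rw [if_pos rfl]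
          rw [show pvBStep (PySem.Set.ofList ds) pm (out, cache) d
              = (PySem.Set.add out d, cache) from by simp [pvBStep, hg]]
          rw [PySem.Set.add_of_not_mem (hfresh d (by simp))]
          rw [ih (out ++ [d]) cache hnd.of_cons ?_ hcache]
          · simp
          · intro y hy
            simp only [List.mem_append, List.mem_singleton]
            rintro (h | rfl)
            · exact hfresh y (by simp [hy]) h
            · exact (List.nodup_cons.mp hnd).1 hy
      | some p =>
          have hter : pvIter pm (pm.length + 1) (some p) = none := pvPre_allNone ds pm hpre _
          have hw := pvAncWalk_correct (PySem.Set.ofList ds) pm (pm.length + 1) [] cache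
            (some p) hter (le_refl _) hcache (by simp)
          have hloop : pvALoop (PySem.Set.ofList ds) pm (pm.length + 1) (some p)
              = !pvAnc (PySem.Set.ofList ds) pm (pm.length + 1) p := by
            rw [pvALoop_eq_not_optHit, pvOptHit_some]
          rw [hloop]
          cases hr : (pvAncWalk (PySem.Set.ofList ds) pm (pm.length + 1) [] cache (some p)).1 with
          | true =>
              have hv : pvAnc (PySem.Set.ofList ds) pm (pm.length + 1) p = true := by
                have := hw.1; rw [hr] at this; simpa [pvHitOpt] using this.symm
              rw [hv, if_neg (by simp)]
              rw [show pvBStep (PySem.Set.ofList ds) pm (out, cache) d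
                  = (out, (pvAncWalk (PySem.Set.ofList ds) pm (pm.length + 1) [] cache (some p)).2)
                  from by simp [pvBStep, hg, hr]]
              rw [ih out _ hnd.of_cons (fun y hy => hfresh y (by simp [hy])) hw.2]
          | false =>
              have hv : pvAnc (PySem.Set.ofList ds) pm (pm.length + 1) p = false := by
                have := hw.1; rw [hr] at this; simpa [pvHitOpt] using this.symm
              rw [hv, if_pos (by simp)]
              rw [show pvBStep (PySem.Set.ofList ds) pm (out, cache) d
                  = (PySem.Set.add out d, (pvAncWalk (PySem.Set.ofList ds) pm (pm.length + 1) [] cache (some p)).2)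
                  from by simp [pvBStep, hg, hr]]
              rw [PySem.Set.add_of_not_mem (hfresh d (by simp))]
              rw [ih (out ++ [d]) _ hnd.of_cons ?_ hw.2]
              · simp
              · intro y hy
                simp only [List.mem_append, List.mem_singleton]
                rintro (h | rfl)
                · exact hfresh y (by simp [hy]) h
                · exact (List.nodup_cons.mp hnd).1 hy

-- ===== VERDICT (by name: the statement is the Claim_ definition above) =====
theorem compute_delete_roots_py_spec : Claim_equal_compute_delete_roots_py := by
  intro ds pm _ hpre
  unfold Spec_compute_delete_roots_py
  rw [pvA_eq_filter]
  unfold compute_delete_roots_py_alt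
  rw [pvB_fold ds pm hpre (PySem.Set.ofList ds) PySem.Set.empty PySem.Dict.empty
    (PySem.Set.nodup_ofList ds) (by intro y _ hy; simp [PySem.Set.empty] at hy)
    (by intro y b hb; simp [PySem.Dict.get?_empty] at hb)]
  simp [PySem.Set.empty]
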